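-- pv_equiv track=rewrite | github.com/alexandreavj/TALENTODEI-project | src/main/python/OLD_eyetracker_data.py | aggregate_fixations_by_card_gaze
-- ===== SOURCE A (Python) =====
-- def aggregate_fixations_by_card_gaze(fixations, rectangle_size, list_rectangles_coords_on_screen):
--     aggregated_fixations = []
--     for i in range(len(list_rectangles_coords_on_screen)):
--         aggregated_fixations.append(list())
--     for fixation in fixations:
--         i = 0
--         for coords in list_rectangles_coords_on_screen:
--             if (coords[0] <= fixation[0] <= coords[0] + rectangle_size[0]) and (coords[1] <= fixation[1] <= coords[1] + rectangle_size[1]):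
--                 aggregated_fixations[i].append(fixation)
--                 break
--             i = i + 1
--
--     return aggregated_fixations
-- ===== SOURCE B (Python) =====
-- def aggregate_fixations_by_card_gaze(fixations, rectangle_size, list_rectangles_coords_on_screen):
--     w, h = rectangle_size
--     buckets = []
--     pool = list(fixations)
--     for x, y in list_rectangles_coords_on_screen:
--         hit, miss = [], []
--         for f in pool:
--             if x <= f[0] <= x + w and y <= f[1] <= y + h:
--                 hit.append(f)
--             else:
--                 miss.append(f)
--         buckets.append(hit)
--         pool = miss
--     return buckets
-- ===== Notes on version B (the rewrite author's own statement) =====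
-- stated objective: alternative
-- what changed: A scans rectangles for each fixation (fixation-outer loop with break, writing into pre-built buckets); B loops over rectangles and partitions a shrinking pool of still-unassigned fixations into the rectangle's bucket and the remainder, so the first-containing-rectangle rule falls out of the sieve order.
import Mathlib
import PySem

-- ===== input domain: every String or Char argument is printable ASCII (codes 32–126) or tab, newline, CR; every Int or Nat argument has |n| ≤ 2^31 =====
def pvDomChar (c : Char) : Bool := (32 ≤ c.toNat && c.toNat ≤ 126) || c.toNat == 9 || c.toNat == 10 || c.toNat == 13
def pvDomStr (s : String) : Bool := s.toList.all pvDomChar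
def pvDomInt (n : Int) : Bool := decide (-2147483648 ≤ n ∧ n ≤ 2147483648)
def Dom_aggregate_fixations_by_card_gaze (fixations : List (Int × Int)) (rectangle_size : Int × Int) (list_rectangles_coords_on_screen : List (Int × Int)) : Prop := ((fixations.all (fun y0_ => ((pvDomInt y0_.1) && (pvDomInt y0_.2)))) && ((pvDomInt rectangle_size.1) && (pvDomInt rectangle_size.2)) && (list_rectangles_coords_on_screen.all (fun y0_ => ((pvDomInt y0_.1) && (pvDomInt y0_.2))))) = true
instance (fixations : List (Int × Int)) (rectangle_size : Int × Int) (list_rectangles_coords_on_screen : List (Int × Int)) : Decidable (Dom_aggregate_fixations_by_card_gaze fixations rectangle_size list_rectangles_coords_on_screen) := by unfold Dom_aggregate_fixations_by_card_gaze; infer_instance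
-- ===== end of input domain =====

-- B replaces A's per-fixation scan over rectangles by a per-rectangle sieve that partitions a
-- shrinking pool of unassigned fixations (objective: alternative decomposition, same asymptotic cost).

-- ===== PORT A =====
-- inner 'for coords in list_rectangles' loop with counter i and break
def pvAinner (rsz f : Int × Int) : List (Int × Int) → Nat → List (List (Int × Int)) → List (List (Int × Int))
  | [], _, agg => agg
  | c :: cs, i, agg =>
    if c.1 ≤ f.1 ∧ f.1 ≤ c.1 + rsz.1 ∧ c.2 ≤ f.2 ∧ f.2 ≤ c.2 + rsz.2 then
      agg.set i ((agg.getD i []) ++ [f])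
    else pvAinner rsz f cs (i + 1) agg

def aggregate_fixations_by_card_gaze (fixations : List (Int × Int)) (rectangle_size : Int × Int) (list_rectangles_coords_on_screen : List (Int × Int)) : List (List (Int × Int)) :=
  let init := list_rectangles_coords_on_screen.foldl (fun acc _ => acc ++ [[]]) ([] : List (List (Int × Int)))
  fixations.foldl (fun agg f => pvAinner rectangle_size f list_rectangles_coords_on_screen 0 agg) init

-- ===== PORT B =====
-- inner 'for f in pool' loop building (hit, miss)
def pvSplit (w h x y : Int) (pool : List (Int × Int)) : List (Int × Int) × List (Int × Int) :=
  pool.foldl (fun st f =>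
    if x ≤ f.1 ∧ f.1 ≤ x + w ∧ y ≤ f.2 ∧ f.2 ≤ y + h then (st.1 ++ [f], st.2)
    else (st.1, st.2 ++ [f])) ([], [])

def aggregate_fixations_by_card_gaze_alt (fixations : List (Int × Int)) (rectangle_size : Int × Int) (list_rectangles_coords_on_screen : List (Int × Int)) : List (List (Int × Int)) :=
  (list_rectangles_coords_on_screen.foldl
    (fun (st : List (List (Int × Int)) × List (Int × Int)) c =>
      let p := pvSplit rectangle_size.1 rectangle_size.2 c.1 c.2 st.2
      (st.1 ++ [p.1], p.2)) ([], fixations)).1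

-- ===== PRECONDITION & SPEC =====
def Spec_aggregate_fixations_by_card_gaze (fixations : List (Int × Int)) (rectangle_size : Int × Int) (list_rectangles_coords_on_screen : List (Int × Int)) (out : List (List (Int × Int))) : Prop := out = aggregate_fixations_by_card_gaze_alt fixations rectangle_size list_rectangles_coords_on_screen
instance (fixations : List (Int × Int)) (rectangle_size : Int × Int) (list_rectangles_coords_on_screen : List (Int × Int)) (out : List (List (Int × Int))) : Decidable (Spec_aggregate_fixations_by_card_gaze fixations rectangle_size list_rectangles_coords_on_screen out) := by unfold Spec_aggregate_fixations_by_card_gaze; infer_instance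

-- ===== CLAIM (what is proved, stated in full; the proofs are below) =====
def Claim_equal_aggregate_fixations_by_card_gaze : Prop := ∀ (fixations : List (Int × Int)) (rectangle_size : Int × Int) (list_rectangles_coords_on_screen : List (Int × Int)), Dom_aggregate_fixations_by_card_gaze fixations rectangle_size list_rectangles_coords_on_screen → Spec_aggregate_fixations_by_card_gaze fixations rectangle_size list_rectangles_coords_on_screen (aggregate_fixations_by_card_gaze fixations rectangle_size list_rectangles_coords_on_screen)

-- ===== LEMMAS AND PROOFS =====

-- the containment test, kept opaque to simp so filter predicates match across lemmas
def pvP (rsz c f : Int × Int) : Bool :=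
  decide (c.1 ≤ f.1 ∧ f.1 ≤ c.1 + rsz.1 ∧ c.2 ≤ f.2 ∧ f.2 ≤ c.2 + rsz.2)

-- the common "sieve" normal form: bucket of the first rectangle, then recurse on the leftovers
def pvSieve (rsz : Int × Int) : List (Int × Int) → List (Int × Int) → List (List (Int × Int))
  | [], _ => []
  | c :: cs, fs => fs.filter (pvP rsz c) :: pvSieve rsz cs (fs.filter (fun f => !pvP rsz c f))

lemma pv_init_eq (rects : List (Int × Int)) (a : List (List (Int × Int))) :
    rects.foldl (fun acc _ => acc ++ [[]]) a = a ++ List.replicate rects.length [] := by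
  induction rects generalizing a with
  | nil => simp
  | cons c cs ih => simp [List.foldl_cons, ih, List.replicate_succ]

lemma pvAinner_shift (rsz f : Int × Int) (cs : List (Int × Int)) :
    ∀ (i : Nat) (b : List (Int × Int)) (rest : List (List (Int × Int))),
      pvAinner rsz f cs (i + 1) (b :: rest) = b :: pvAinner rsz f cs i rest := by
  induction cs with
  | nil => intro i b rest; simp [pvAinner]
  | cons c cs' ih =>
      intro i b rest
      by_cases h : c.1 ≤ f.1 ∧ f.1 ≤ c.1 + rsz.1 ∧ c.2 ≤ f.2 ∧ f.2 ≤ c.2 + rsz.2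
      · simp only [pvAinner]
        rw [if_pos h, if_pos h]
        simp [List.set]
      · simp only [pvAinner]
        rw [if_neg h, if_neg h, ih]

lemma pvA_head (rsz c : Int × Int) (cs : List (Int × Int)) :
    ∀ (fs : List (Int × Int)) (b : List (Int × Int)) (rest : List (List (Int × Int))),
      fs.foldl (fun agg f => pvAinner rsz f (c :: cs) 0 agg) (b :: rest)
        = (b ++ fs.filter (pvP rsz c)) ::
          (fs.filter (fun f => !pvP rsz c f)).foldl (fun agg f => pvAinner rsz f cs 0 agg) rest := by
  intro fs
  induction fs with
  | nil => intro b rest; simp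
  | cons f fs' ih =>
      intro b rest
      rw [List.foldl_cons, List.filter_cons, List.filter_cons]
      by_cases h : c.1 ≤ f.1 ∧ f.1 ≤ c.1 + rsz.1 ∧ c.2 ≤ f.2 ∧ f.2 ≤ c.2 + rsz.2
      · have hp : pvP rsz c f = true := by simp [pvP, h]
        have e1 : pvAinner rsz f (c :: cs) 0 (b :: rest) = (b ++ [f]) :: rest := by
          simp only [pvAinner]
          rw [if_pos h]
          simp
        rw [e1, ih (b ++ [f]) rest, hp]
        simp
      · have hp : pvP rsz c f = false := by simp [pvP, h]
        have e1 : pvAinner rsz f (c :: cs) 0 (b :: rest) = b :: pvAinner rsz f cs 0 rest := by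
          simp only [pvAinner]
          rw [if_neg h]
          exact pvAinner_shift rsz f cs 0 b rest
        rw [e1, ih b (pvAinner rsz f cs 0 rest), hp]
        simp
lemma pvA_sieve (rsz : Int × Int) (rects : List (Int × Int)) :
    ∀ fs : List (Int × Int),
      fs.foldl (fun agg f => pvAinner rsz f rects 0 agg) (List.replicate rects.length [])
        = pvSieve rsz rects fs := by
  induction rects with
  | nil =>
      intro fs
      have hfold : ∀ (a : List (List (Int × Int))),
          fs.foldl (fun agg f => pvAinner rsz f [] 0 agg) a = a := by
        induction fs with
        | nil => intro a; rfl
        | cons f fs' ih => intro a; simp [List.foldl_cons, pvAinner]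
      simpa [pvSieve] using hfold []
  | cons c cs ih =>
      intro fs
      rw [List.length_cons, List.replicate_succ, pvA_head]
      simp [pvSieve, ih]

lemma pvSplit_eq (w h x y : Int) (pool : List (Int × Int)) :
    ∀ (a b : List (Int × Int)),
      pool.foldl (fun st f =>
        if x ≤ f.1 ∧ f.1 ≤ x + w ∧ y ≤ f.2 ∧ f.2 ≤ y + h then (st.1 ++ [f], st.2)
        else (st.1, st.2 ++ [f])) (a, b)
      = (a ++ pool.filter (pvP (w, h) (x, y)), b ++ pool.filter (fun f => !pvP (w, h) (x, y) f)) := by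
  induction pool with
  | nil => intro a b; simp
  | cons f fs ih =>
      intro a b
      rw [List.foldl_cons, List.filter_cons, List.filter_cons]
      by_cases hf : x ≤ f.1 ∧ f.1 ≤ x + w ∧ y ≤ f.2 ∧ f.2 ≤ y + h
      · have hp : pvP (w, h) (x, y) f = true := by simp [pvP, hf]
        rw [if_pos hf, ih (a ++ [f]) b, hp]
        simp
      · have hp : pvP (w, h) (x, y) f = false := by simp [pvP, hf]
        rw [if_neg hf, ih a (b ++ [f]), hp]
        simp

lemma pvB_sieve (rsz : Int × Int) (rects : List (Int × Int)) :
    ∀ (B0 : List (List (Int × Int))) (pool : List (Int × Int)),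
      (rects.foldl (fun (st : List (List (Int × Int)) × List (Int × Int)) c =>
          let p := pvSplit rsz.1 rsz.2 c.1 c.2 st.2
          (st.1 ++ [p.1], p.2)) (B0, pool)).1
        = B0 ++ pvSieve rsz rects pool := by
  induction rects with
  | nil => intro B0 pool; simp [pvSieve]
  | cons c cs ih =>
      intro B0 pool
      have hs : pvSplit rsz.1 rsz.2 c.1 c.2 pool
          = (pool.filter (pvP rsz c), pool.filter (fun f => !pvP rsz c f)) := by
        unfold pvSplit
        rw [pvSplit_eq]
        simp
      rw [List.foldl_cons]
      simp only [hs]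
      rw [ih]
      simp [pvSieve]

-- ===== VERDICT (by name: the statement is the Claim_ definition above) =====
theorem aggregate_fixations_by_card_gaze_spec : Claim_equal_aggregate_fixations_by_card_gaze := by
  intro fs rsz rects _
  unfold Spec_aggregate_fixations_by_card_gaze aggregate_fixations_by_card_gaze aggregate_fixations_by_card_gaze_alt
  rw [pv_init_eq, List.nil_append, pvA_sieve, pvB_sieve, List.nil_append]
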